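-- pv_equiv track=rewrite | github.com/BasicOrg/odoo_updated_modules | web_studio/controllers/report.py | parse_simple_dotted_expr
-- ===== SOURCE A (Python) =====
-- def parse_simple_dotted_expr(expr):
--     parsed = []
--     fn_level = 0
--
--     single_expr = []
--     for char in expr:
--         if char == "." and not fn_level:
--             parsed.append("".join(single_expr))
--             single_expr = []
--             continue
--
--         elif char == '(':
--             fn_level += 1
--
--         elif char == ')':
--             fn_level -= 1
--
--         single_expr.append(char)
--
--     parsed.append("".join(single_expr))
--
--     return parsed
-- ===== SOURCE B (Python) =====
-- def parse_simple_dotted_expr(expr):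
--     # Pass 1: record the indices of top-level dots.
--     depth = 0
--     cuts = []
--     for i, char in enumerate(expr):
--         if char == '(':
--             depth += 1
--         elif char == ')':
--             depth -= 1
--         elif char == '.' and depth == 0:
--             cuts.append(i)
--     # Pass 2: slice the original string between those boundaries.
--     parts = []
--     start = 0
--     for i in cuts:
--         parts.append(expr[start:i])
--         start = i + 1
--     parts.append(expr[start:])
--     return parts
-- ===== Notes on version B (the rewrite author's own statement) =====
-- stated objective: alternative
-- what changed: B replaces A's single accumulate-characters-into-the-current-segment loop by two passes: one pass records the indices of top-level dots, then the result is built by slicing the original string between consecutive cut indices.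
import Mathlib
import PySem

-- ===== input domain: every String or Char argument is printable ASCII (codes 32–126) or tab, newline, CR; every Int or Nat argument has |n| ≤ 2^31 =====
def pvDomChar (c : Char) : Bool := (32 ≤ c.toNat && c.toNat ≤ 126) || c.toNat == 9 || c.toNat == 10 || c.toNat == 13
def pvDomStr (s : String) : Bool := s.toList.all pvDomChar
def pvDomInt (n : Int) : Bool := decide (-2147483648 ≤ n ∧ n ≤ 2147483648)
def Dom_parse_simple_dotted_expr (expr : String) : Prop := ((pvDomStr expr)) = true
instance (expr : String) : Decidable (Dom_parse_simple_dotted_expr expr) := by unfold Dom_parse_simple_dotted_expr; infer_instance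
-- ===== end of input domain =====

-- B splits by recording top-level-dot indices in one pass and slicing the original
-- string between them, instead of A's accumulate-current-segment loop (objective: alternative).

-- ===== PORT A =====
def stepA (st : List String × Int × List Char) (c : Char) : List String × Int × List Char :=
  let (parsed, fn, single) := st
  if c = '.' ∧ fn = 0 then (parsed ++ [String.mk single], fn, [])
  else
    let fn' := if c = '(' then fn + 1 else if c = ')' then fn - 1 else fn
    (parsed, fn', single ++ [c])

def parse_simple_dotted_expr (expr : String) : List String :=
  let st := expr.toList.foldl stepA ([], 0, [])
  st.1 ++ [String.mk st.2.2]

-- ===== PORT B =====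
def stepB (st : Int × List Int) (p : Int × Char) : Int × List Int :=
  if p.2 = '(' then (st.1 + 1, st.2)
  else if p.2 = ')' then (st.1 - 1, st.2)
  else if p.2 = '.' ∧ st.1 = 0 then (st.1, st.2 ++ [p.1])
  else st

def stepE (cs : List Char) (st : List String × Int) (i : Int) : List String × Int :=
  (st.1 ++ [String.mk (PySem.List.slice cs (some st.2) (some i))], i + 1)

def parse_simple_dotted_expr_alt (expr : String) : List String :=
  let cs := expr.toList
  let cuts := ((PySem.List.enumerate cs 0).foldl stepB (0, [])).2
  let st := cuts.foldl (stepE cs) ([], 0)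
  st.1 ++ [String.mk (PySem.List.slice cs (some st.2) none)]

-- ===== PRECONDITION & SPEC =====
def Spec_parse_simple_dotted_expr (expr : String) (out : List String) : Prop := out = parse_simple_dotted_expr_alt expr
instance (expr : String) (out : List String) : Decidable (Spec_parse_simple_dotted_expr expr out) := by unfold Spec_parse_simple_dotted_expr; infer_instance

-- ===== CLAIM (what is proved, stated in full; the proofs are below) =====
def Claim_equal_parse_simple_dotted_expr : Prop := ∀ (expr : String), Dom_parse_simple_dotted_expr expr → Spec_parse_simple_dotted_expr expr (parse_simple_dotted_expr expr)

-- ===== LEMMAS AND PROOFS =====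

-- Common specification: the list of top-level-dot segments of cs at initial depth d.
def splitTop (d : Int) : List Char → List (List Char)
  | [] => [[]]
  | c :: cs =>
    if c = '.' ∧ d = 0 then [] :: splitTop d cs
    else
      let d' := if c = '(' then d + 1 else if c = ')' then d - 1 else d
      match splitTop d' cs with
      | [] => [[c]]
      | s :: rest => (c :: s) :: rest

theorem splitTop_ne_nil (d : Int) (cs : List Char) : splitTop d cs ≠ [] := by
  cases cs with
  | nil => simp [splitTop]
  | cons c cs =>
    simp only [splitTop]
    split
    · simp
    · split <;> simp

theorem aLoop_eq (cs : List Char) : ∀ (parsed : List String) (d : Int) (single : List Char),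
    (cs.foldl stepA (parsed, d, single)).1 ++ [String.mk (cs.foldl stepA (parsed, d, single)).2.2]
    = parsed ++ ((splitTop d cs).modifyHead (single ++ ·)).map String.mk := by
  induction cs with
  | nil => intro parsed d single; simp [splitTop]
  | cons c cs ih =>
    intro parsed d single
    by_cases h : c = '.' ∧ d = 0
    · simp only [List.foldl_cons, stepA, if_pos h, splitTop, ih]
      have hid : (splitTop d cs).modifyHead (fun x => x) = splitTop d cs := by
        rcases splitTop d cs with _ | ⟨s, rest⟩ <;> rfl
      simp [hid]
    · simp only [List.foldl_cons, stepA, if_neg h, splitTop, ih]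
      rcases hs : splitTop (if c = '(' then d + 1 else if c = ')' then d - 1 else d) cs with _ | ⟨s, rest⟩
      · exact absurd hs (splitTop_ne_nil _ _)
      · simp [hs, if_neg h]

-- Specification of the cut indices produced by B's first pass.
def cutsSpec (d : Int) (i : Nat) : List Char → List Int
  | [] => []
  | c :: cs =>
    if c = '(' then cutsSpec (d + 1) (i + 1) cs
    else if c = ')' then cutsSpec (d - 1) (i + 1) cs
    else if c = '.' ∧ d = 0 then (i : Int) :: cutsSpec d (i + 1) cs
    else cutsSpec d (i + 1) cs

theorem cuts_eq (cs : List Char) : ∀ (d : Int) (i : Nat) (acc : List Int),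
    ((PySem.List.enumerate cs (i : Int)).foldl stepB (d, acc)).2 = acc ++ cutsSpec d i cs := by
  induction cs with
  | nil => intro d i acc; simp [cutsSpec, PySem.List.enumerate_nil]
  | cons c cs ih =>
    intro d i acc
    rw [PySem.List.enumerate_cons, List.foldl_cons]
    have hcast : (i : Int) + 1 = ((i + 1 : Nat) : Int) := by push_cast; ring
    by_cases h1 : c = '('
    · have hstep : stepB (d, acc) ((i : Int), c) = (d + 1, acc) := by simp [stepB, h1]
      rw [hstep, hcast, ih]
      simp [cutsSpec, h1]
    · by_cases h2 : c = ')'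
      · have hstep : stepB (d, acc) ((i : Int), c) = (d - 1, acc) := by simp [stepB, h1, h2]
        rw [hstep, hcast, ih]
        simp [cutsSpec, h1, h2]
      · by_cases h3 : c = '.' ∧ d = 0
        · have hstep : stepB (d, acc) ((i : Int), c) = (d, acc ++ [(i : Int)]) := by
            simp [stepB, h1, h2, h3]
          rw [hstep, hcast, ih]
          simp [cutsSpec, h1, h2, h3, List.append_assoc]
        · have hstep : stepB (d, acc) ((i : Int), c) = (d, acc) := by simp [stepB, h1, h2, h3]
          rw [hstep, hcast, ih]
          simp [cutsSpec, h1, h2, h3]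
theorem emit_gen (full : List Char) : ∀ (cs : List Char) (d : Int) (i s0 : Nat)
    (acc : List String), i ≤ full.length → s0 ≤ i → cs = full.drop i →
    ((cutsSpec d i cs).foldl (stepE full) (acc, (s0 : Int))).1
      ++ [String.mk (PySem.List.slice full
            (some ((cutsSpec d i cs).foldl (stepE full) (acc, (s0 : Int))).2) none)]
    = acc ++ ((splitTop d cs).modifyHead ((full.drop s0).take (i - s0) ++ ·)).map String.mk := by
  intro cs
  induction cs with
  | nil =>
    intro d i s0 acc hi hs0 hcs
    have hlen : i = full.length := by
      have := congrArg List.length hcs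
      simp [List.length_drop] at this
      omega
    simp only [cutsSpec, List.foldl_nil, splitTop, List.modifyHead_cons, List.map_cons,
      List.map_nil, PySem.List.slice_from_natCast]
    have : (full.drop s0).take (i - s0) = full.drop s0 := by
      apply List.take_of_length_le
      simp [List.length_drop]; omega
    simp [this]
  | cons c cs ih =>
    intro d i s0 acc hi hs0 hcs
    have hlt : i < full.length := by
      by_contra hle
      rw [List.drop_eq_nil_of_le (by omega)] at hcs
      exact List.cons_ne_nil _ _ hcs
    have hget : full[i]? = some c := by
      have h0 : (full.drop i)[0]? = some c := by rw [← hcs]; rfl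
      rwa [List.getElem?_drop, Nat.add_zero] at h0
    have hcs' : cs = full.drop (i + 1) := by
      have h := congrArg List.tail hcs
      simpa [List.drop_tail] using h
    have htake : (full.drop s0).take (i + 1 - s0) = (full.drop s0).take (i - s0) ++ [c] := by
      have hi1 : i + 1 - s0 = (i - s0) + 1 := by omega
      rw [hi1, List.take_succ]
      have : (full.drop s0)[i - s0]? = some c := by
        rw [List.getElem?_drop]
        rw [show s0 + (i - s0) = i by omega]; exact hget
      simp [this]
    by_cases h3 : c = '.' ∧ d = 0
    · have h1 : c ≠ '(' := by rintro rfl; exact absurd h3.1 (by decide)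
      have h2 : c ≠ ')' := by rintro rfl; exact absurd h3.1 (by decide)
      simp only [cutsSpec, if_neg h1, if_neg h2, if_pos h3, List.foldl_cons, stepE]
      have hcast : (i : Int) + 1 = ((i + 1 : Nat) : Int) := by push_cast; ring
      rw [hcast, ih d (i + 1) (i + 1) _ (by omega) (by omega) hcs']
      simp only [splitTop, if_pos h3, List.modifyHead_cons, List.map_cons, Nat.sub_self,
        List.take_zero, List.nil_append, List.append_nil]
      rw [PySem.List.slice_natCast]
      have hid : (splitTop d cs).modifyHead (fun x => x) = splitTop d cs := by
        rcases splitTop d cs with _ | ⟨s, rest⟩ <;> rfl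
      simp [List.append_assoc, hid]
    · simp only [splitTop, if_neg h3]
      have hd' : splitTop (if c = '(' then d + 1 else if c = ')' then d - 1 else d) cs ≠ [] :=
        splitTop_ne_nil _ _
      rcases hs : splitTop (if c = '(' then d + 1 else if c = ')' then d - 1 else d) cs
        with _ | ⟨s, rest⟩
      · exact absurd hs hd'
      have hcuts : cutsSpec d i (c :: cs)
          = cutsSpec (if c = '(' then d + 1 else if c = ')' then d - 1 else d) (i + 1) cs := by
        by_cases h1 : c = '('
        · simp [cutsSpec, h1]
        · by_cases h2 : c = ')'
          · simp [cutsSpec, h1, h2]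
          · simp [cutsSpec, h1, h2, h3]
      rw [hcuts, ih _ (i + 1) s0 acc (by omega) (by omega) hcs', hs]
      simp [htake, List.append_assoc]

-- ===== VERDICT (by name: the statement is the Claim_ definition above) =====
theorem parse_simple_dotted_expr_spec : Claim_equal_parse_simple_dotted_expr := by
  intro expr _
  show parse_simple_dotted_expr expr = parse_simple_dotted_expr_alt expr
  unfold parse_simple_dotted_expr parse_simple_dotted_expr_alt
  have hA := aLoop_eq expr.toList [] 0 []
  have hB := cuts_eq expr.toList 0 0 []
  have hE := emit_gen expr.toList expr.toList 0 0 0 [] (by omega) (by omega) (by simp)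
  simp only [Nat.cast_zero] at hB hE
  simp only [hA, hB, List.nil_append] at *
  rw [hE]
  have : (splitTop 0 expr.toList).modifyHead (fun s => [] ++ s)
      = splitTop 0 expr.toList := by
    rcases h : splitTop 0 expr.toList with _ | ⟨s, rest⟩ <;> simp
  simp only [List.drop_zero, List.take_zero] at *
  simp [this]
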